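-- pv_equiv track=rewrite | github.com/stingram/Simple-Problems | Lesson_Distribute_Bonuses/python/bonus.py | bonus_v2
-- ===== SOURCE A (Python) =====
-- def bonus_v2(nums):
--     b = [1]*len(nums)
--
--     for i in range(1,len(nums)):
--         if nums[i-1] < nums[i]:
--             b[i] = b[i-1]+1
--
--     for i in range(len(nums)-2,-1,-1):
--         if nums[i+1] < nums[i]:
--             b[i] = max(b[i], b[i+1]+1)
--
--     return b
-- ===== SOURCE B (Python) =====
-- def bonus_v2(nums):
--     # Relaxation in value order: visit indices from smallest value to largest;
--     # when an index is visited both smaller neighbors already hold their final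
--     # bonus, so a single max-relaxation per index yields the answer.
--     n = len(nums)
--     b = [1] * n
--     for i in sorted(range(n), key=lambda j: nums[j]):
--         if i > 0 and nums[i - 1] < nums[i]:
--             b[i] = max(b[i], b[i - 1] + 1)
--         if i + 1 < n and nums[i + 1] < nums[i]:
--             b[i] = max(b[i], b[i + 1] + 1)
--     return b
-- ===== Notes on version B (the rewrite author's own statement) =====
-- stated objective: alternative
-- what changed: B replaces A's two directed in-place DP passes by a rank-order relaxation: it sorts the indices by value and relaxes each index once against both neighbors, which is correct because every strictly-smaller neighbor is already final when an index is visited.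
import Mathlib
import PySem

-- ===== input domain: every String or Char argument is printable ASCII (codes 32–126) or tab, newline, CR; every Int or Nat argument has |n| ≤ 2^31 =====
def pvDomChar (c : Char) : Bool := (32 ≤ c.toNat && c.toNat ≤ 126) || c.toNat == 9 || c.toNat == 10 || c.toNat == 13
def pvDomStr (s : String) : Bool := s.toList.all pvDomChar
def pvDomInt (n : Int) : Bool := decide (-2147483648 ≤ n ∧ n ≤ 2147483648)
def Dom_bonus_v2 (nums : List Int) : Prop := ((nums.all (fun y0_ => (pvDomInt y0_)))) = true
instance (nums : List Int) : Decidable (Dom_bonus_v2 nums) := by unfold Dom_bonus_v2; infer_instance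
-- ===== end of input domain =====

-- B replaces A's two directed in-place DP passes by a rank-order relaxation (sort the
-- indices by value, relax each once against both neighbors); alternative algorithm,
-- same behaviour on every input.

-- ===== PORT A =====
-- body of the forward loop: if nums[i-1] < nums[i]: b[i] = b[i-1]+1
def pvFwdStep (nums : List Int) (b : List Int) (i : Int) : List Int :=
  if PySem.List.pyGetD nums (i - 1) 0 < PySem.List.pyGetD nums i 0 then
    PySem.List.pySetD b i (PySem.List.pyGetD b (i - 1) 0 + 1)
  else b

-- body of the backward loop: if nums[i+1] < nums[i]: b[i] = max(b[i], b[i+1]+1)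
def pvBwdStep (nums : List Int) (b : List Int) (i : Int) : List Int :=
  if PySem.List.pyGetD nums (i + 1) 0 < PySem.List.pyGetD nums i 0 then
    PySem.List.pySetD b i (max (PySem.List.pyGetD b i 0) (PySem.List.pyGetD b (i + 1) 0 + 1))
  else b

def bonus_v2 (nums : List Int) : List Int :=
  let b0 := List.replicate nums.length (1 : Int)
  let b1 := (PySem.List.pyRange 1 (nums.length : Int) 1).foldl (pvFwdStep nums) b0
  (PySem.List.pyRange ((nums.length : Int) - 2) (-1) (-1)).foldl (pvBwdStep nums) b1

-- ===== PORT B =====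
-- loop body of Source B: relax index i against its left and right neighbor
def pvRelax (nums : List Int) (b : List Int) (i : Int) : List Int :=
  let b1 :=
    if 0 < i ∧ PySem.List.pyGetD nums (i - 1) 0 < PySem.List.pyGetD nums i 0 then
      PySem.List.pySetD b i (max (PySem.List.pyGetD b i 0) (PySem.List.pyGetD b (i - 1) 0 + 1))
    else b
  if i + 1 < (nums.length : Int) ∧ PySem.List.pyGetD nums (i + 1) 0 < PySem.List.pyGetD nums i 0 then
    PySem.List.pySetD b1 i (max (PySem.List.pyGetD b1 i 0) (PySem.List.pyGetD b1 (i + 1) 0 + 1))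
  else b1

def bonus_v2_alt (nums : List Int) : List Int :=
  let b0 := List.replicate nums.length (1 : Int)
  let order := PySem.List.sorted (PySem.List.pyRange 0 (nums.length : Int) 1)
      (fun j => PySem.List.pyGetD nums j 0) false
  order.foldl (pvRelax nums) b0

-- ===== PRECONDITION & SPEC =====
def Spec_bonus_v2 (nums : List Int) (out : List Int) : Prop := out = bonus_v2_alt nums
instance (nums : List Int) (out : List Int) : Decidable (Spec_bonus_v2 nums out) := by unfold Spec_bonus_v2; infer_instance

-- ===== CLAIM (what is proved, stated in full; the proofs are below) =====
def Claim_equal_bonus_v2 : Prop := ∀ (nums : List Int), Dom_bonus_v2 nums → Spec_bonus_v2 nums (bonus_v2 nums)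

-- ===== LEMMAS AND PROOFS =====

-- mathematical description of the run lengths, by index
def upIdx (nums : List Int) : Nat → Int
  | 0 => 0
  | i + 1 => if nums.getD i 0 < nums.getD (i + 1) 0 then upIdx nums i + 1 else 0

def downIdx (nums : List Int) (i : Nat) : Int := upIdx nums.reverse (nums.length - 1 - i)

-- the common value both programs put at index i
def fVal (nums : List Int) (i : Nat) : Int := 1 + max (upIdx nums i) (downIdx nums i)

theorem upIdx_nonneg (nums : List Int) (i : Nat) : 0 ≤ upIdx nums i := by
  induction i with
  | zero => simp [upIdx]
  | succ i ih => simp only [upIdx]; split <;> omega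

theorem downIdx_nonneg (nums : List Int) (i : Nat) : 0 ≤ downIdx nums i :=
  upIdx_nonneg _ _

theorem getD_reverse (nums : List Int) (j : Nat) (hj : j < nums.length) :
    nums.reverse.getD j 0 = nums.getD (nums.length - 1 - j) 0 := by
  rw [List.getD_eq_getElem _ _ (by simpa using hj), List.getD_eq_getElem _ _ (by omega),
    List.getElem_reverse]

theorem downIdx_succ (nums : List Int) (i : Nat) (h : i + 1 < nums.length) :
    downIdx nums i = if nums.getD (i + 1) 0 < nums.getD i 0 then downIdx nums (i + 1) + 1 else 0 := by
  unfold downIdx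
  have h1 : nums.length - 1 - i = (nums.length - 1 - (i + 1)) + 1 := by omega
  rw [h1]
  simp only [upIdx]
  rw [getD_reverse nums _ (by omega), getD_reverse nums _ (by omega)]
  have h2 : nums.length - 1 - (nums.length - 1 - (i + 1)) = i + 1 := by omega
  have h3 : nums.length - 1 - ((nums.length - 1 - (i + 1)) + 1) = i := by omega
  rw [h2, h3]

theorem downIdx_last (nums : List Int) : downIdx nums (nums.length - 1) = 0 := by
  unfold downIdx
  rw [Nat.sub_self]
  rfl

theorem upIdx_succ (nums : List Int) (j : Nat) :
    upIdx nums (j + 1)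
      = if nums.getD j 0 < nums.getD (j + 1) 0 then upIdx nums j + 1 else 0 := rfl

theorem getD_set_eq_ite (l : List Int) (k i : Nat) (v : Int) (hi : i < l.length) :
    (l.set k v).getD i 0 = if k = i then v else l.getD i 0 := by
  rw [List.getD_eq_getElem _ _ (by simpa using hi), List.getElem_set]
  split_ifs
  · rfl
  · exact (List.getD_eq_getElem _ _ hi).symm

-- forward pass invariant (A)
theorem fwd_inv (nums : List Int) (k : Nat) (hk : k ≤ nums.length) :
    ((PySem.List.pyRange 1 (k : Int) 1).foldl (pvFwdStep nums)
        (List.replicate nums.length (1 : Int))).length = nums.length ∧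
    ∀ i, i < nums.length →
      ((PySem.List.pyRange 1 (k : Int) 1).foldl (pvFwdStep nums)
          (List.replicate nums.length (1 : Int))).getD i 0
        = if i < k then 1 + upIdx nums i else 1 := by
  induction k with
  | zero =>
    rw [PySem.List.pyRange_one_eq_nil (by norm_num)]
    simp only [List.foldl_nil]
    refine ⟨by simp, ?_⟩
    intro i hi
    rw [List.getD_eq_getElem _ _ (by simpa using hi), List.getElem_replicate]
    simp
  | succ k ih =>
    obtain ⟨hlen, hget⟩ := ih (by omega)
    by_cases hk0 : k = 0
    · subst hk0
      rw [show ((0 + 1 : Nat) : Int) = 1 by norm_num, PySem.List.pyRange_one_eq_nil le_rfl]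
      simp only [List.foldl_nil]
      refine ⟨by simp, ?_⟩
      intro i hi
      rw [List.getD_eq_getElem _ _ (by simpa using hi), List.getElem_replicate]
      split_ifs with h
      · have : i = 0 := by omega
        subst this; simp [upIdx]
      · rfl
    · obtain ⟨m, rfl⟩ : ∃ m, k = m + 1 := ⟨k - 1, by omega⟩
      rw [show ((m + 1 + 1 : Nat) : Int) = ((m + 1 : Nat) : Int) + 1 by push_cast; ring,
        PySem.List.pyRange_one_succ_right (by exact_mod_cast Nat.le_add_left 1 m),
        List.foldl_append]
      simp only [List.foldl_cons, List.foldl_nil]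
      rw [pvFwdStep]
      rw [show ((m + 1 : Nat) : Int) - 1 = ((m : Nat) : Int) by push_cast; ring]
      simp only [PySem.List.pyGetD_natCast, PySem.List.pySetD_natCast]
      by_cases hc : nums.getD m 0 < nums.getD (m + 1) 0
      · rw [if_pos hc]
        refine ⟨by simpa using hlen, ?_⟩
        intro i hi
        rw [getD_set_eq_ite _ _ _ _ (by rw [hlen]; exact hi)]
        by_cases h1 : m + 1 = i
        · subst h1
          rw [if_pos rfl, if_pos (Nat.lt_succ_self (m + 1)), hget m (by omega),
            if_pos (Nat.lt_succ_self m), upIdx_succ, if_pos hc]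
          ring
        · rw [if_neg h1, hget i hi]
          by_cases h2 : i < m + 1
          · rw [if_pos h2, if_pos (by omega)]
          · rw [if_neg h2, if_neg (by omega)]
      · rw [if_neg hc]
        refine ⟨hlen, ?_⟩
        intro i hi
        rw [hget i hi]
        by_cases h1 : i < m + 1
        · rw [if_pos h1, if_pos (by omega)]
        · by_cases h2 : i < m + 1 + 1
          · have hieq : i = m + 1 := by omega
            subst hieq
            rw [if_neg h1, if_pos h2, upIdx_succ, if_neg hc]
            omega
          · rw [if_neg h1, if_neg h2]

-- backward pass invariant (A)
theorem bwd_inv (nums : List Int) :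
    ∀ (t : Nat) (a : Int) (b : List Int), a + 1 ≤ (t : Int) → a ≤ (nums.length : Int) - 2 →
      b.length = nums.length →
      (∀ i, i < nums.length → (i : Int) ≤ a → b.getD i 0 = 1 + upIdx nums i) →
      (∀ i, i < nums.length → a < (i : Int) →
        b.getD i 0 = 1 + max (upIdx nums i) (downIdx nums i)) →
      ((PySem.List.pyRange a (-1) (-1)).foldl (pvBwdStep nums) b).length = nums.length ∧
      ∀ i, i < nums.length →
        ((PySem.List.pyRange a (-1) (-1)).foldl (pvBwdStep nums) b).getD i 0
          = 1 + max (upIdx nums i) (downIdx nums i) := by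
  intro t
  induction t with
  | zero =>
    intro a b ht ha hlen h1 h2
    rw [PySem.List.pyRange_neg_one_eq_nil (by omega)]
    exact ⟨hlen, fun i hi => h2 i hi (by omega)⟩
  | succ t ih =>
    intro a b ht ha hlen h1 h2
    by_cases ha0 : a < 0
    · rw [PySem.List.pyRange_neg_one_eq_nil (by omega)]
      exact ⟨hlen, fun i hi => h2 i hi (by omega)⟩
    · rw [not_lt] at ha0
      rw [PySem.List.pyRange_neg_one_cons (by omega)]
      simp only [List.foldl_cons]
      obtain ⟨j, rfl⟩ : ∃ j : Nat, a = (j : Int) := ⟨a.toNat, (Int.toNat_of_nonneg ha0).symm⟩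
      have hjn : j + 1 < nums.length := by omega
      rw [pvBwdStep]
      rw [show (j : Int) + 1 = ((j + 1 : Nat) : Int) by push_cast; ring]
      simp only [PySem.List.pyGetD_natCast, PySem.List.pySetD_natCast]
      by_cases hc : nums.getD (j + 1) 0 < nums.getD j 0
      · rw [if_pos hc]
        have hbj : b.getD j 0 = 1 + upIdx nums j := h1 j (by omega) (by omega)
        have hbj1 : b.getD (j + 1) 0 = 1 + max (upIdx nums (j + 1)) (downIdx nums (j + 1)) :=
          h2 (j + 1) hjn (by omega)
        have hnc : ¬ nums.getD j 0 < nums.getD (j + 1) 0 := not_lt.mpr hc.le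
        have hup1 : upIdx nums (j + 1) = 0 := by rw [upIdx_succ, if_neg hnc]
        have hdj : downIdx nums j = downIdx nums (j + 1) + 1 := by
          rw [downIdx_succ nums j hjn, if_pos hc]
        have hdnn : 0 ≤ downIdx nums (j + 1) := upIdx_nonneg _ _
        have hunn : 0 ≤ upIdx nums j := upIdx_nonneg _ _
        have hval : max (b.getD j 0) (b.getD (j + 1) 0 + 1)
            = 1 + max (upIdx nums j) (downIdx nums j) := by
          rw [hbj, hbj1, hup1, hdj]; omega
        refine ih ((j : Int) - 1) _ (by omega) (by omega) (by simpa using hlen) ?_ ?_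
        · intro i hi hia
          rw [getD_set_eq_ite _ _ _ _ (by rw [hlen]; exact hi), if_neg (by omega)]
          exact h1 i hi (by omega)
        · intro i hi hia
          rw [getD_set_eq_ite _ _ _ _ (by rw [hlen]; exact hi)]
          split_ifs with h0
          · subst h0; exact hval
          · exact h2 i hi (by omega)
      · rw [if_neg hc]
        refine ih ((j : Int) - 1) b (by omega) (by omega) hlen ?_ ?_
        · intro i hi hia
          exact h1 i hi (by omega)
        · intro i hi hia
          by_cases hij : i = j
          · subst hij
            rw [h1 i (by omega) (by omega)]
            have hd0 : downIdx nums i = 0 := by rw [downIdx_succ nums i hjn, if_neg hc]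
            rw [hd0, max_eq_left (upIdx_nonneg _ _)]
          · exact h2 i hi (by omega)

theorem a_eq (nums : List Int) :
    bonus_v2 nums = (List.range nums.length).map (fVal nums) := by
  simp only [bonus_v2]
  obtain ⟨hlen1, hget1⟩ := fwd_inv nums nums.length le_rfl
  obtain ⟨hlen2, hget2⟩ :=
    bwd_inv nums nums.length ((nums.length : Int) - 2) _ (by omega) (by omega) hlen1
      (fun i hi _ => by rw [hget1 i hi, if_pos hi])
      (fun i hi hia => by
        rw [hget1 i hi, if_pos hi]
        have hie : i = nums.length - 1 := by omega
        subst hie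
        rw [downIdx_last, max_eq_left (upIdx_nonneg _ _)])
  apply List.ext_getElem
  · simpa using hlen2
  · intro i hi1 hi2
    have h := hget2 i (by simpa using hlen2 ▸ hi1)
    rw [List.getD_eq_getElem _ _ hi1] at h
    rw [h, List.getElem_map, List.getElem_range]
    rfl

-- one relaxation step, performed on an index whose strictly-smaller neighbors are final
theorem relax_inv (nums : List Int) :
    ∀ (rest pre b : List Int),
      (pre ++ rest).Perm (PySem.List.pyRange 0 (nums.length : Int) 1) →
      (pre ++ rest).Pairwise
        (fun x y => PySem.List.pyGetD nums x 0 ≤ PySem.List.pyGetD nums y 0) →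
      b.length = nums.length →
      (∀ j : Nat, j < nums.length →
        b.getD j 0 = if ((j : Int)) ∈ pre then fVal nums j else 1) →
      (rest.foldl (pvRelax nums) b).length = nums.length ∧
      ∀ j : Nat, j < nums.length →
        (rest.foldl (pvRelax nums) b).getD j 0
          = if ((j : Int)) ∈ pre ++ rest then fVal nums j else 1 := by
  intro rest
  induction rest with
  | nil =>
    intro pre b hperm hpw hlen hinv
    simp only [List.foldl_nil, List.append_nil]
    exact ⟨hlen, hinv⟩
  | cons i rest ih =>
    intro pre b hperm hpw hlen hinv
    have hmem : ∀ x : Int, x ∈ pre ++ i :: rest ↔ 0 ≤ x ∧ x < (nums.length : Int) := by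
      intro x
      rw [hperm.mem_iff, PySem.List.mem_pyRange_one]
    have hnd : (pre ++ i :: rest).Nodup :=
      hperm.symm.nodup (PySem.List.nodup_pyRange_one 0 (nums.length : Int))
    rw [List.nodup_append] at hnd
    obtain ⟨-, hnd2, hdisj⟩ := hnd
    have hinotpre : i ∉ pre := fun h => hdisj i h i (by simp) rfl
    obtain ⟨hi0, hiN⟩ := (hmem i).mp (by simp)
    obtain ⟨j0, rfl⟩ : ∃ j0 : Nat, i = (j0 : Int) := ⟨i.toNat, (Int.toNat_of_nonneg hi0).symm⟩
    have hj0 : j0 < nums.length := by exact_mod_cast hiN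
    rw [List.pairwise_append] at hpw
    obtain ⟨hpw1, hpw2, hcross⟩ := hpw
    rw [List.pairwise_cons] at hpw2
    obtain ⟨hiR, hRpw⟩ := hpw2
    -- the strictly-smaller left neighbor is already processed
    have hleft : ∀ m : Nat, j0 = m + 1 → nums.getD m 0 < nums.getD j0 0 →
        ((m : Nat) : Int) ∈ pre := by
      intro m hm hlt
      have hmmem : ((m : Nat) : Int) ∈ pre ++ (j0 : Int) :: rest :=
        (hmem _).mpr ⟨by omega, by omega⟩
      rcases List.mem_append.mp hmmem with h | h
      · exact h
      · rcases List.mem_cons.mp h with h | h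
        · exfalso; omega
        · exfalso
          have := hiR _ h
          simp only [PySem.List.pyGetD_natCast] at this
          omega
    have hright : j0 + 1 < nums.length → nums.getD (j0 + 1) 0 < nums.getD j0 0 →
        (((j0 + 1 : Nat)) : Int) ∈ pre := by
      intro hlen1 hlt
      have hmmem : (((j0 + 1 : Nat)) : Int) ∈ pre ++ (j0 : Int) :: rest :=
        (hmem _).mpr ⟨by omega, by omega⟩
      rcases List.mem_append.mp hmmem with h | h
      · exact h
      · rcases List.mem_cons.mp h with h | h
        · exfalso; omega
        · exfalso
          have := hiR _ h
          simp only [PySem.List.pyGetD_natCast] at this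
          omega
    have hbj0 : b.getD j0 0 = 1 := by
      rw [hinv j0 hj0, if_neg hinotpre]
    -- characterize the first (left) relaxation
    have hb1 :
        (if 0 < ((j0 : Nat) : Int) ∧
            PySem.List.pyGetD nums (((j0 : Nat) : Int) - 1) 0
              < PySem.List.pyGetD nums ((j0 : Nat) : Int) 0 then
          PySem.List.pySetD b ((j0 : Nat) : Int)
            (max (PySem.List.pyGetD b ((j0 : Nat) : Int) 0)
              (PySem.List.pyGetD b (((j0 : Nat) : Int) - 1) 0 + 1))
        else b).length = nums.length ∧
        ∀ j : Nat, j < nums.length →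
        (if 0 < ((j0 : Nat) : Int) ∧
            PySem.List.pyGetD nums (((j0 : Nat) : Int) - 1) 0
              < PySem.List.pyGetD nums ((j0 : Nat) : Int) 0 then
          PySem.List.pySetD b ((j0 : Nat) : Int)
            (max (PySem.List.pyGetD b ((j0 : Nat) : Int) 0)
              (PySem.List.pyGetD b (((j0 : Nat) : Int) - 1) 0 + 1))
        else b).getD j 0 = if j = j0 then 1 + upIdx nums j0 else b.getD j 0 := by
      match hj0e : j0 with
      | 0 =>
        rw [if_neg (by simp)]
        refine ⟨hlen, ?_⟩
        intro j hj
        split_ifs with h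
        · subst h; rw [hbj0]; simp [upIdx]
        · rfl
      | m + 1 =>
        rw [show (((m + 1 : Nat) : Int)) - 1 = ((m : Nat) : Int) by push_cast; ring]
        simp only [PySem.List.pyGetD_natCast, PySem.List.pySetD_natCast]
        by_cases hc : nums.getD m 0 < nums.getD (m + 1) 0
        · rw [if_pos ⟨by positivity, hc⟩]
          have hmpre : ((m : Nat) : Int) ∈ pre := hleft m rfl hc
          have hbm : b.getD m 0 = fVal nums m := by
            rw [hinv m (by omega), if_pos hmpre]
          have hdm : downIdx nums m = 0 := by
            rw [downIdx_succ nums m hj0, if_neg (not_lt.mpr hc.le)]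
          have hbm' : b.getD m 0 = 1 + upIdx nums m := by
            rw [hbm]; unfold fVal; rw [hdm, max_eq_left (upIdx_nonneg _ _)]
          refine ⟨by simp [hlen], ?_⟩
          intro j hj
          rw [getD_set_eq_ite _ _ _ _ (by rw [hlen]; exact hj)]
          split_ifs with h1 h2 h2
          · rw [hbj0, hbm', upIdx_succ, if_pos hc]
            have := upIdx_nonneg nums m
            omega
          · exact absurd h1.symm h2
          · exact absurd h2.symm h1
          · rfl
        · rw [if_neg (by rintro ⟨-, h⟩; exact hc h)]
          refine ⟨hlen, ?_⟩
          intro j hj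
          split_ifs with h
          · subst h; rw [hbj0, upIdx_succ, if_neg hc]; ring
          · rfl
    -- characterize the second (right) relaxation on top of it
    simp only [List.foldl_cons]
    rw [pvRelax]
    set b1 := (if 0 < ((j0 : Nat) : Int) ∧
        PySem.List.pyGetD nums (((j0 : Nat) : Int) - 1) 0
          < PySem.List.pyGetD nums ((j0 : Nat) : Int) 0 then
      PySem.List.pySetD b ((j0 : Nat) : Int)
        (max (PySem.List.pyGetD b ((j0 : Nat) : Int) 0)
          (PySem.List.pyGetD b (((j0 : Nat) : Int) - 1) 0 + 1))
    else b) with hb1def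
    obtain ⟨hb1len, hb1get⟩ := hb1
    have hb1j0 : b1.getD j0 0 = 1 + upIdx nums j0 := by
      rw [hb1get j0 hj0, if_pos rfl]
    have hstep :
        (if ((j0 : Nat) : Int) + 1 < (nums.length : Int) ∧
            PySem.List.pyGetD nums (((j0 : Nat) : Int) + 1) 0
              < PySem.List.pyGetD nums ((j0 : Nat) : Int) 0 then
          PySem.List.pySetD b1 ((j0 : Nat) : Int)
            (max (PySem.List.pyGetD b1 ((j0 : Nat) : Int) 0)
              (PySem.List.pyGetD b1 (((j0 : Nat) : Int) + 1) 0 + 1))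
        else b1).length = nums.length ∧
        ∀ j : Nat, j < nums.length →
        (if ((j0 : Nat) : Int) + 1 < (nums.length : Int) ∧
            PySem.List.pyGetD nums (((j0 : Nat) : Int) + 1) 0
              < PySem.List.pyGetD nums ((j0 : Nat) : Int) 0 then
          PySem.List.pySetD b1 ((j0 : Nat) : Int)
            (max (PySem.List.pyGetD b1 ((j0 : Nat) : Int) 0)
              (PySem.List.pyGetD b1 (((j0 : Nat) : Int) + 1) 0 + 1))
        else b1).getD j 0 = if j = j0 then fVal nums j0 else b.getD j 0 := by
      rw [show (((j0 : Nat) : Int)) + 1 = (((j0 + 1 : Nat)) : Int) by push_cast; ring]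
      simp only [PySem.List.pyGetD_natCast, PySem.List.pySetD_natCast]
      by_cases hc : j0 + 1 < nums.length ∧ nums.getD (j0 + 1) 0 < nums.getD j0 0
      · obtain ⟨hcn, hclt⟩ := hc
        rw [if_pos ⟨by exact_mod_cast hcn, hclt⟩]
        have hppre : (((j0 + 1 : Nat)) : Int) ∈ pre := hright hcn hclt
        have hbp : b.getD (j0 + 1) 0 = fVal nums (j0 + 1) := by
          rw [hinv (j0 + 1) hcn, if_pos hppre]
        have hup1 : upIdx nums (j0 + 1) = 0 := by
          rw [upIdx_succ, if_neg (not_lt.mpr hclt.le)]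
        have hbp' : b.getD (j0 + 1) 0 = 1 + downIdx nums (j0 + 1) := by
          rw [hbp]; unfold fVal; rw [hup1, max_eq_right (downIdx_nonneg _ _)]
        have hb1p : b1.getD (j0 + 1) 0 = b.getD (j0 + 1) 0 := by
          rw [hb1get (j0 + 1) hcn, if_neg (by omega)]
        have hdj : downIdx nums j0 = downIdx nums (j0 + 1) + 1 := by
          rw [downIdx_succ nums j0 hcn, if_pos hclt]
        refine ⟨by simp [hb1len], ?_⟩
        intro j hj
        rw [getD_set_eq_ite _ _ _ _ (by rw [hb1len]; exact hj)]
        split_ifs with h1 h2 h2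
        · rw [hb1j0, hb1p, hbp']
          unfold fVal
          rw [hdj]
          have := upIdx_nonneg nums j0
          have := downIdx_nonneg nums (j0 + 1)
          omega
        · exact absurd h1.symm h2
        · exact absurd h2.symm h1
        · rw [hb1get j hj, if_neg h2]
      · rw [if_neg (by
          rintro ⟨h1, h2⟩
          exact hc ⟨by exact_mod_cast h1, h2⟩)]
        have hd0 : downIdx nums j0 = 0 := by
          by_cases hn : j0 + 1 < nums.length
          · rw [downIdx_succ nums j0 hn, if_neg (fun h => hc ⟨hn, h⟩)]
          · have : j0 = nums.length - 1 := by omega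
            rw [this, downIdx_last]
        refine ⟨hb1len, ?_⟩
        intro j hj
        rw [hb1get j hj]
        split_ifs with h
        · subst h
          unfold fVal
          rw [hd0, max_eq_left (upIdx_nonneg _ _)]
        · rfl
    obtain ⟨hslen, hsget⟩ := hstep
    have hres := ih (pre ++ [((j0 : Nat) : Int)]) _
      (by simpa using hperm)
      (by
        rw [List.pairwise_append]
        refine ⟨?_, hRpw, ?_⟩
        · rw [List.pairwise_append]
          refine ⟨hpw1, by simp, ?_⟩
          intro x hx y hy
          simp only [List.mem_singleton] at hy
          subst hy
          exact hcross x hx _ List.mem_cons_self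
        · intro x hx y hy
          rcases List.mem_append.mp hx with h | h
          · exact hcross x h y (List.mem_cons_of_mem _ hy)
          · simp only [List.mem_singleton] at h
            subst h
            exact hiR y hy)
      hslen
      (by
        intro j hj
        rw [hsget j hj]
        by_cases h : j = j0
        · subst h
          rw [if_pos rfl, if_pos (by simp)]
        · rw [if_neg h, hinv j hj]
          have : ((j : Int)) ∈ pre ++ [((j0 : Nat) : Int)] ↔ ((j : Int)) ∈ pre := by
            simp only [List.mem_append, List.mem_singleton]
            constructor
            · rintro (hh | hh)
              · exact hh
              · exfalso; exact h (by exact_mod_cast hh)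
            · exact Or.inl
          rw [if_congr this rfl rfl])
    obtain ⟨hrlen, hrget⟩ := hres
    refine ⟨hrlen, ?_⟩
    intro j hj
    rw [hrget j hj]
    have : ((j : Int)) ∈ (pre ++ [((j0 : Nat) : Int)]) ++ rest ↔
        ((j : Int)) ∈ pre ++ ((j0 : Nat) : Int) :: rest := by simp
    rw [if_congr this rfl rfl]

theorem alt_eq (nums : List Int) :
    bonus_v2_alt nums = (List.range nums.length).map (fVal nums) := by
  simp only [bonus_v2_alt]
  have hperm0 := PySem.List.sorted_perm (PySem.List.pyRange 0 (nums.length : Int) 1)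
    (fun j => PySem.List.pyGetD nums j 0) false
  have hpw0 := PySem.List.sorted_pairwise (PySem.List.pyRange 0 (nums.length : Int) 1)
    (fun j => PySem.List.pyGetD nums j 0)
  have hinv0 : ∀ j : Nat, j < nums.length →
      (List.replicate nums.length (1 : Int)).getD j 0
        = if ((j : Int)) ∈ ([] : List Int) then fVal nums j else 1 := by
    intro j hj
    rw [List.getD_eq_getElem _ _ (by simpa using hj), List.getElem_replicate]
    simp
  obtain ⟨hlen, hget⟩ := relax_inv nums
    (PySem.List.sorted (PySem.List.pyRange 0 (nums.length : Int) 1)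
      (fun j => PySem.List.pyGetD nums j 0) false)
    [] (List.replicate nums.length (1 : Int))
    (by simpa using hperm0) (by simpa using hpw0) (by simp) hinv0
  apply List.ext_getElem
  · simpa using hlen
  · intro k h1 h2
    have h := hget k (by simpa using hlen ▸ h1)
    have hm : ((k : Int)) ∈ ([] : List Int) ++
        PySem.List.sorted (PySem.List.pyRange 0 (nums.length : Int) 1)
          (fun j => PySem.List.pyGetD nums j 0) false := by
      rw [List.nil_append, PySem.List.mem_sorted, PySem.List.mem_pyRange_one]
      constructor
      · omega
      · exact_mod_cast (by simpa using hlen ▸ h1)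
    rw [if_pos hm, List.getD_eq_getElem _ _ h1] at h
    rw [h, List.getElem_map, List.getElem_range]

-- ===== VERDICT (by name: the statement is the Claim_ definition above) =====
theorem bonus_v2_spec : Claim_equal_bonus_v2 := by
  intro nums _
  unfold Spec_bonus_v2
  rw [a_eq, alt_eq]
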